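-- pv_equiv track=rewrite | github.com/bobbintb/UnRAID-Plugin-Generator | upg.py | extract_comments_map
-- ===== SOURCE A (Python) =====
-- def extract_comments_map(toml_text):
--     """
--     Extract all comments and associate them with the next non-comment line.
--     Returns dict mapping line_number -> list of comment lines before it.
--     """
--     lines = toml_text.split('\n')
--     comment_map = {}
--     accumulated_comments = []
--
--     for i, line in enumerate(lines):
--         stripped = line.strip()
--
--         if stripped.startswith('#'):
--             # This is a comment line
--             accumulated_comments.append(stripped.lstrip('#').strip())
--         elif stripped:
--             # Non-empty, non-comment line - attach accumulated comments
--             if accumulated_comments: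
--                 comment_map[i] = accumulated_comments.copy()
--                 accumulated_comments = []
--         # Empty lines don't reset comments
--
--     return comment_map, lines
-- ===== SOURCE B (Python) =====
-- def extract_comments_map(toml_text):
--     """Segment-based rewrite: classify every line once, then for each content
--     line gather the cleaned comment lines of the segment since the previous
--     content line (blank lines are skipped, trailing comments are dropped)."""
--     lines = toml_text.split('\n')
--
--     def kind(line):
--         s = line.strip()
--         if s.startswith('#'):
--             return 'c'
--         return 'x' if s else 'b'
--
--     def clean(line):
--         return line.strip().lstrip('#').strip()
--
--     kinds = [kind(l) for l in lines]
--     comment_map = {}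
--     prev = 0
--     for i in range(len(lines)):
--         if kinds[i] == 'x':
--             cs = [clean(lines[j]) for j in range(prev, i) if kinds[j] == 'c']
--             if cs:
--                 comment_map[i] = cs
--             prev = i + 1
--     return comment_map, lines
-- ===== Notes on version B (the rewrite author's own statement) =====
-- stated objective: alternative
-- what changed: A threads a mutable accumulator of pending comments through one forward pass; B first classifies every line (comment/content/blank), then for each content line builds its comment list from the segment of lines since the previous content line, eliminating the carried accumulator.
import Mathlib
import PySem

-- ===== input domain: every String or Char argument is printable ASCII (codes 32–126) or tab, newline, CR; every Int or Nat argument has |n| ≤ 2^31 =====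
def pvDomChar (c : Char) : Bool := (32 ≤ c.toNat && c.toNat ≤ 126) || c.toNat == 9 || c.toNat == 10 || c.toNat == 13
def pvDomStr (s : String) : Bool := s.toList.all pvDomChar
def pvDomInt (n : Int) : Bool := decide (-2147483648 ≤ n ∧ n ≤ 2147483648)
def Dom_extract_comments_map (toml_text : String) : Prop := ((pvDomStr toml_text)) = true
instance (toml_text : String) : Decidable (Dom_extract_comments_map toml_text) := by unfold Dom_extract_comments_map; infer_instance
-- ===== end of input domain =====

-- B replaces A's forward comment accumulator by a classify-then-segment pass
-- (for each content line, gather the comments of the segment since the previous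
-- content line); alternative decomposition, same cost.

-- str.lstrip('#'): drop leading '#' characters (exact; PySem has no lstrip-with-chars)
def pvLstripHash (s : String) : String := String.ofList (s.toList.dropWhile (· == '#'))

-- ===== PORT A =====
def pvStepA (st : PySem.Dict Int (List String) × List String) (p : Int × String) :
    PySem.Dict Int (List String) × List String :=
  let stripped := PySem.Str.strip p.2
  if PySem.Str.startswith stripped "#" then
    (st.1, st.2 ++ [PySem.Str.strip (pvLstripHash stripped)])
  else if stripped ≠ "" then
    (if st.2 ≠ [] then (st.1.insert p.1 st.2, ([] : List String)) else st)
  else st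

def extract_comments_map (toml_text : String) : (List (Int × List String)) × List String :=
  let lines := (PySem.Str.split? toml_text "\n").getD []  -- sep "\n" ≠ "", so split? is always some
  (((PySem.List.enumerate lines).foldl pvStepA (PySem.Dict.empty, [])).1.items, lines)

-- ===== PORT B =====
def pvKind (line : String) : Char :=
  let s := PySem.Str.strip line
  if PySem.Str.startswith s "#" then 'c' else if s ≠ "" then 'x' else 'b'

def pvClean (line : String) : String :=
  PySem.Str.strip (pvLstripHash (PySem.Str.strip line))

-- the list comprehension [clean(lines[j]) for j in range(a, b) if kinds[j] == 'c']
def pvCollect (kinds : List Char) (lines : List String) (a b : Int) : List String :=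
  (PySem.List.pyRange a b).foldl
    (fun cs j =>
      if PySem.List.pyGetD kinds j 'b' == 'c' then cs ++ [pvClean (PySem.List.pyGetD lines j "")]
      else cs) []

def pvStepB (kinds : List Char) (lines : List String)
    (st : PySem.Dict Int (List String) × Int) (i : Int) :
    PySem.Dict Int (List String) × Int :=
  if PySem.List.pyGetD kinds i 'b' == 'x' then
    let cs := pvCollect kinds lines st.2 i
    ((if cs ≠ [] then st.1.insert i cs else st.1), i + 1)
  else st

def extract_comments_map_alt (toml_text : String) : (List (Int × List String)) × List String :=
  let lines := (PySem.Str.split? toml_text "\n").getD []  -- sep "\n" ≠ "", so split? is always some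
  let kinds := lines.map pvKind
  (((PySem.List.pyRange 0 lines.length).foldl (pvStepB kinds lines) (PySem.Dict.empty, 0)).1.items,
   lines)

-- ===== PRECONDITION & SPEC =====
def Spec_extract_comments_map (toml_text : String) (out : (List (Int × List String)) × List String) : Prop := out = extract_comments_map_alt toml_text
instance (toml_text : String) (out : (List (Int × List String)) × List String) : Decidable (Spec_extract_comments_map toml_text out) := by unfold Spec_extract_comments_map; infer_instance

-- ===== CLAIM (what is proved, stated in full; the proofs are below) =====
def Claim_equal_extract_comments_map : Prop := ∀ (toml_text : String), Dom_extract_comments_map toml_text → Spec_extract_comments_map toml_text (extract_comments_map toml_text)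

-- ===== LEMMAS AND PROOFS =====

lemma pvCollect_self (kinds : List Char) (lines : List String) (a : Int) :
    pvCollect kinds lines a a = [] := by
  simp [pvCollect, PySem.List.pyRange]

lemma pvCollect_snoc (kinds : List Char) (lines : List String) (a : Int) (s : Nat)
    (ha : a ≤ (s : Int)) :
    pvCollect kinds lines a ((s : Int) + 1) =
      pvCollect kinds lines a (s : Int) ++
        (if PySem.List.pyGetD kinds (s : Int) 'b' == 'c'
         then [pvClean (PySem.List.pyGetD lines (s : Int) "")] else []) := by
  unfold pvCollect
  rw [PySem.List.pyRange_one_append a (s : Int) ((s : Int) + 1) ha (by omega),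
    List.foldl_append,
    PySem.List.pyRange_one_cons (by omega : (s : Int) < (s : Int) + 1)]
  have h0 : PySem.List.pyRange ((s : Int) + 1) ((s : Int) + 1) = [] := by
    simp [PySem.List.pyRange]
  rw [h0]
  simp only [List.foldl_cons, List.foldl_nil]
  split <;> simp

lemma pv_key (lines : List String) :
    ∀ (suf : List String) (s : Nat), suf = lines.drop s →
    ∀ (d : PySem.Dict Int (List String)) (prev : Nat), prev ≤ s →
    ((PySem.List.enumerate suf (s : Int)).foldl pvStepA
        (d, pvCollect (lines.map pvKind) lines (prev : Int) (s : Int))).1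
      = ((PySem.List.pyRange (s : Int) (lines.length : Int)).foldl
          (pvStepB (lines.map pvKind) lines) (d, (prev : Int))).1 := by
  intro suf
  induction suf with
  | nil =>
    intro s hsuf d prev hprev
    have hle : lines.length ≤ s := by
      by_contra h
      have := congrArg List.length hsuf
      simp [List.length_drop] at this
      omega
    have hr : PySem.List.pyRange (s : Int) (lines.length : Int) = [] := by
      simp [PySem.List.pyRange]
      omega
    simp [PySem.List.enumerate, hr]
  | cons l rest ih =>
    intro s hsuf d prev hprev
    have hlen : lines.length = s + (rest.length + 1) := by
      have := congrArg List.length hsuf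
      simp [List.length_drop] at this
      omega
    have hlt : s < lines.length := by omega
    have hl : lines[s]'hlt = l := by
      have h0 : (lines.drop s)[0]? = some l := by rw [← hsuf]; rfl
      rw [List.getElem?_drop] at h0
      simp only [Nat.add_zero] at h0
      rw [List.getElem?_eq_getElem hlt] at h0
      exact Option.some.inj h0
    have hrest : rest = lines.drop (s + 1) := by
      have : (lines.drop s).tail = rest := by rw [← hsuf]; rfl
      rw [← this, List.tail_drop]
    have hk : PySem.List.pyGetD (lines.map pvKind) (s : Int) 'b' = pvKind l := by
      rw [PySem.List.pyGetD_natCast, List.getD_eq_getElem _ _ (by simpa using hlt)]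
      simp [hl]
    have hline : PySem.List.pyGetD lines (s : Int) "" = l := by
      rw [PySem.List.pyGetD_natCast, List.getD_eq_getElem _ _ hlt]
      exact hl
    have hcast : ((s : Int) + 1) = ((s + 1 : Nat) : Int) := by push_cast; ring
    rw [PySem.List.enumerate_cons, List.foldl_cons,
      PySem.List.pyRange_one_cons (by exact_mod_cast hlt), List.foldl_cons]
    by_cases hc : PySem.Str.startswith (PySem.Str.strip l) "#"
    · -- comment line
      have hc' : PySem.Chars.startswith (PySem.Chars.strip l.toList) ['#'] = true := by
        simpa using hc
      have hkc : pvKind l = 'c' := by simp [pvKind, hc']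
      have hstepA : pvStepA (d, pvCollect (lines.map pvKind) lines (prev : Int) (s : Int)) ((s : Int), l)
          = (d, pvCollect (lines.map pvKind) lines (prev : Int) ((s : Int) + 1)) := by
        rw [pvCollect_snoc _ _ _ _ (by exact_mod_cast hprev)]
        simp [pvStepA, hc', hk, hkc, pvClean, hline]
      have hstepB : pvStepB (lines.map pvKind) lines (d, (prev : Int)) (s : Int)
          = (d, (prev : Int)) := by
        simp [pvStepB, hk, hkc]
      rw [hstepA, hstepB, hcast]
      exact ih (s + 1) hrest d prev (by omega)
    · have hc' : PySem.Chars.startswith (PySem.Chars.strip l.toList) ['#'] = false := by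
        simpa using hc
      by_cases hx : PySem.Str.strip l ≠ ""
      · -- content line
        have hkx : pvKind l = 'x' := by simp [pvKind, hc', hx]
        have hrw : pvCollect (lines.map pvKind) lines (prev : Int) ((s : Int) + 1)
            = pvCollect (lines.map pvKind) lines (prev : Int) (s : Int) := by
          rw [pvCollect_snoc _ _ _ _ (by exact_mod_cast hprev)]
          simp [hk, hkx]
        have hstepB : pvStepB (lines.map pvKind) lines (d, (prev : Int)) (s : Int)
            = ((if pvCollect (lines.map pvKind) lines (prev : Int) (s : Int) ≠ []
                then d.insert (s : Int) (pvCollect (lines.map pvKind) lines (prev : Int) (s : Int))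
                else d), (s : Int) + 1) := by
          simp [pvStepB, hk, hkx]
        rw [hstepB]
        by_cases hacc : pvCollect (lines.map pvKind) lines (prev : Int) (s : Int) = []
        · have hA : pvStepA (d, pvCollect (lines.map pvKind) lines (prev : Int) (s : Int)) ((s : Int), l)
              = (d, pvCollect (lines.map pvKind) lines (prev : Int) (s : Int)) := by
            simp [pvStepA, hc', hx, hacc]
          have h2 := ih (s + 1) hrest d (s + 1) le_rfl
          simp only [pvCollect_self, Nat.cast_add, Nat.cast_one] at h2
          rw [hA, hacc]
          simpa using h2
        · have hA : pvStepA (d, pvCollect (lines.map pvKind) lines (prev : Int) (s : Int)) ((s : Int), l)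
              = (d.insert (s : Int) (pvCollect (lines.map pvKind) lines (prev : Int) (s : Int)), []) := by
            simp [pvStepA, hc', hx, hacc]
          have h2 := ih (s + 1) hrest
            (d.insert (s : Int) (pvCollect (lines.map pvKind) lines (prev : Int) (s : Int))) (s + 1) le_rfl
          simp only [pvCollect_self, Nat.cast_add, Nat.cast_one] at h2
          rw [hA]
          simp only [if_pos hacc]
          exact h2
      · -- blank line
        have hxe : PySem.Str.strip l = "" := by simpa using hx
        have hkb : pvKind l = 'b' := by simp [pvKind, hxe]; decide
        have hstepA : pvStepA (d, pvCollect (lines.map pvKind) lines (prev : Int) (s : Int)) ((s : Int), l)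
            = (d, pvCollect (lines.map pvKind) lines (prev : Int) ((s : Int) + 1)) := by
          rw [pvCollect_snoc _ _ _ _ (by exact_mod_cast hprev)]
          simp [pvStepA, hk, hkb, hxe]
          decide
        have hstepB : pvStepB (lines.map pvKind) lines (d, (prev : Int)) (s : Int)
            = (d, (prev : Int)) := by
          simp [pvStepB, hk, hkb]
        rw [hstepA, hstepB, hcast]
        exact ih (s + 1) hrest d prev (by omega)

-- ===== VERDICT (by name: the statement is the Claim_ definition above) =====
theorem extract_comments_map_spec : Claim_equal_extract_comments_map := by
  intro t _
  show _ = _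
  unfold extract_comments_map extract_comments_map_alt
  have h := pv_key ((PySem.Str.split? t "\n").getD []) ((PySem.Str.split? t "\n").getD []) 0 rfl
    PySem.Dict.empty 0 (le_refl 0)
  simp only [Nat.cast_zero, pvCollect_self] at h
  simpa using congrArg PySem.Dict.items h
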